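-- pv_equiv track=rewrite | github.com/p0ss/MenaceAssetPacker | tools/generate_sdk.py | csharp_safe_type
-- ===== SOURCE A (Python) =====
-- def csharp_safe_type(il2cpp_type: str) -> str:
--     """Convert IL2CPP type to safe C# type."""
--     # Handle common IL2CPP types
--     mappings = {
--         'Int32': 'int',
--         'Int64': 'long',
--         'Int16': 'short',
--         'Single': 'float',
--         'Double': 'double',
--         'Boolean': 'bool',
--         'Byte': 'byte',
--         'String': 'string',
--         'Void': 'void',
--     }
--
--     for old, new in mappings.items():
--         il2cpp_type = il2cpp_type.replace(old, new)
--
--     return il2cpp_type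
-- ===== SOURCE B (Python) =====
-- _MAPPINGS = [
--     ('Int32', 'int'),
--     ('Int64', 'long'),
--     ('Int16', 'short'),
--     ('Single', 'float'),
--     ('Double', 'double'),
--     ('Boolean', 'bool'),
--     ('Byte', 'byte'),
--     ('String', 'string'),
--     ('Void', 'void'),
-- ]
--
--
-- def csharp_safe_type(il2cpp_type: str) -> str:
--     """Convert IL2CPP type to safe C# type."""
--     # One simultaneous left-to-right pass over the original text: at each
--     # position emit the mapping of whichever type name starts there, or the
--     # character itself.
--     out = []
--     i = 0
--     n = len(il2cpp_type)
--     while i < n: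
--         for old, new in _MAPPINGS:
--             if il2cpp_type.startswith(old, i):
--                 out.append(new)
--                 i += len(old)
--                 break
--         else:
--             out.append(il2cpp_type[i])
--             i += 1
--     return ''.join(out)
-- ===== Notes on version B (the rewrite author's own statement) =====
-- stated objective: alternative
-- what changed: Replaces nine sequential full-string .replace scans (each rescanning the partially rewritten text) by one simultaneous left-to-right pass over the original text that matches any of the nine type names at each position and emits its mapping; Pre_ excludes strings containing the substring 'VoiDouble', where A's ordered replaces cascade across a replaced boundary (rewriting Double first creates a fresh Void occurrence that A also rewrites) while B rewrites each original occurrence once, an overlapping-rewrite corner neither behaviour of which is specified.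
-- outside the precondition, e.g. on csharp_safe_type('VoiDouble'): A returns 'voidouble', B returns 'Voidouble'
import Mathlib
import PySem

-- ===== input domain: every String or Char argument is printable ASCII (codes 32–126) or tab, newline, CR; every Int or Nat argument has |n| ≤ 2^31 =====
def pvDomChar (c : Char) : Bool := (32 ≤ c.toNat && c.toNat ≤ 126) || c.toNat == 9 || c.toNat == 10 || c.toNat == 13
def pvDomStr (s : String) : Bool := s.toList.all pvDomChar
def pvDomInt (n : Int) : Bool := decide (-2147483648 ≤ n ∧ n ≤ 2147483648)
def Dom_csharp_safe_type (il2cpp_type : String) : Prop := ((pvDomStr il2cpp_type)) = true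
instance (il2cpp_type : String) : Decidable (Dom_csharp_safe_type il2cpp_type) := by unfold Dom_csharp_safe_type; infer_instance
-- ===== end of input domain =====

-- B replaces A's nine sequential full-string .replace scans by one simultaneous left-to-right
-- pass over the original text (alternative decomposition; return value only, no mutation).

-- ===== PORT A =====
def csharp_safe_type (il2cpp_type : String) : String :=
  let s := PySem.Str.replace il2cpp_type "Int32" "int"
  let s := PySem.Str.replace s "Int64" "long"
  let s := PySem.Str.replace s "Int16" "short"
  let s := PySem.Str.replace s "Single" "float"
  let s := PySem.Str.replace s "Double" "double"
  let s := PySem.Str.replace s "Boolean" "bool"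
  let s := PySem.Str.replace s "Byte" "byte"
  let s := PySem.Str.replace s "String" "string"
  let s := PySem.Str.replace s "Void" "void"
  s

-- ===== PORT B =====
-- the mapping list, in A's dict order
def pvKeys : List (List Char × List Char) :=
  [("Int32".toList, "int".toList), ("Int64".toList, "long".toList), ("Int16".toList, "short".toList),
   ("Single".toList, "float".toList), ("Double".toList, "double".toList), ("Boolean".toList, "bool".toList),
   ("Byte".toList, "byte".toList), ("String".toList, "string".toList), ("Void".toList, "void".toList)]

-- first (old, new) pair whose old starts at the current position (Source B's inner for/startswith loop)
def pvMatch : List (List Char × List Char) → List Char → Option (List Char × List Char)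
  | [], _ => none
  | (k, v) :: ks, s => if k.isPrefixOf s then some (k, v) else pvMatch ks s

-- Source B's while loop over positions; fuel = number of remaining characters bounds the iteration
def pvPassF (ks : List (List Char × List Char)) : Nat → List Char → List Char
  | 0, s => s
  | fuel+1, s =>
    match s with
    | [] => []
    | c :: cs =>
      match pvMatch ks (c :: cs) with
      | some (k, v) => v ++ pvPassF ks fuel (cs.drop (k.length - 1))
      | none => c :: pvPassF ks fuel cs

def csharp_safe_type_alt (il2cpp_type : String) : String :=
  String.ofList (pvPassF pvKeys il2cpp_type.toList.length il2cpp_type.toList)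

-- ===== PRECONDITION & SPEC =====
-- Pre_ excludes strings containing the substring "VoiDouble": there A's nine ordered replaces
-- cascade across a replaced boundary (rewriting Double first creates a fresh Void occurrence,
-- which A then also rewrites) while B's single simultaneous pass rewrites each original
-- occurrence once, so the two values differ (see the cite in claim.json); neither value is
-- specified for such overlapping-rewrite corners.
def Pre_csharp_safe_type (il2cpp_type : String) : Prop :=
  ¬ ("VoiDouble".toList <:+: il2cpp_type.toList)
instance (il2cpp_type : String) : Decidable (Pre_csharp_safe_type il2cpp_type) := by
  unfold Pre_csharp_safe_type; infer_instance

def pvWitness_csharp_safe_type : String := "VoidInt32"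

def Spec_csharp_safe_type (il2cpp_type : String) (out : String) : Prop :=
  out = csharp_safe_type_alt il2cpp_type
instance (il2cpp_type : String) (out : String) : Decidable (Spec_csharp_safe_type il2cpp_type out) := by
  unfold Spec_csharp_safe_type; infer_instance

-- ===== CLAIM (what is proved, stated in full; the proofs are below) =====
def Claim_equal_csharp_safe_type : Prop := ∀ (il2cpp_type : String), Dom_csharp_safe_type il2cpp_type → Pre_csharp_safe_type il2cpp_type → Spec_csharp_safe_type il2cpp_type (csharp_safe_type il2cpp_type)

-- ===== LEMMAS AND PROOFS =====

-- abbreviation for the pass at its natural fuel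
def pvPass (ks : List (List Char × List Char)) (s : List Char) : List Char :=
  pvPassF ks s.length s

-- ---- replace.go characterisation ----
lemma pv_go_eq (old new : List Char) (hold : old ≠ []) :
    ∀ fuel l acc, l.length ≤ fuel →
      PySem.Chars.replace.go old new fuel l acc
        = acc.reverse ++ PySem.Chars.replace.go old new l.length l [] := by
  have hpos : 0 < old.length := List.length_pos_iff.mpr hold
  intro fuel
  induction fuel using Nat.strong_induction_on with
  | _ fuel ih =>
    intro l acc hl
    match fuel, l with
    | 0, l =>
      have : l = [] := List.eq_nil_of_length_eq_zero (Nat.le_zero.mp hl)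
      subst this
      simp [PySem.Chars.replace.go]
    | f + 1, [] => simp [PySem.Chars.replace.go]
    | f + 1, c :: t =>
      have hf : t.length ≤ f := by simp only [List.length_cons] at hl; omega
      by_cases hp : old.isPrefixOf (c :: t) = true
      · have hdl : ((c :: t).drop old.length).length ≤ t.length := by
          simp only [List.length_drop, List.length_cons]; omega
        simp only [PySem.Chars.replace.go, List.length_cons, hp, if_pos]
        rw [ih f (by omega) _ (new.reverse ++ acc) (hdl.trans hf),
            ih t.length (by omega) _ (new.reverse ++ []) hdl]
        simp
      · simp only [PySem.Chars.replace.go, List.length_cons, hp, if_neg, Bool.false_eq_true,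
          not_false_eq_true]
        rw [ih f (by omega) t (c :: acc) hf, ih t.length (by omega) t [c] (le_refl _)]
        simp


lemma pv_replace_nil (old new : List Char) (hold : old ≠ []) :
    PySem.Chars.replace [] old new = [] := by
  simp [PySem.Chars.replace, PySem.Chars.replace.go, List.isEmpty_iff, hold]

lemma pv_replace_cons_neg (old new : List Char) (c : Char) (cs : List Char)
    (h : ¬ old.isPrefixOf (c :: cs) = true) :
    PySem.Chars.replace (c :: cs) old new = c :: PySem.Chars.replace cs old new := by
  match old with
  | [] => simp [List.isPrefixOf] at h
  | o :: ot =>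
    simp only [PySem.Chars.replace, List.isEmpty_cons, Bool.false_eq_true, if_false,
      List.length_cons]
    simp only [PySem.Chars.replace.go, h, if_neg, Bool.false_eq_true, not_false_eq_true]
    rw [pv_go_eq (o :: ot) new (by simp) cs.length cs [c] (le_refl _)]
    simp

lemma pv_replace_pos (old new t : List Char) (hold : old ≠ []) :
    PySem.Chars.replace (old ++ t) old new = new ++ PySem.Chars.replace t old new := by
  match old with
  | o :: ot =>
    have hp : (o :: ot).isPrefixOf (o :: (ot ++ t)) = true := by
      rw [← List.cons_append]; exact List.isPrefixOf_iff_prefix.mpr (List.prefix_append _ _)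
    have hdrop : List.drop (o :: ot).length (o :: (ot ++ t)) = t := by
      rw [← List.cons_append]; exact List.drop_left
    simp only [PySem.Chars.replace, List.isEmpty_cons, Bool.false_eq_true, if_false,
      List.cons_append, List.length_cons]
    simp only [PySem.Chars.replace.go, hp, if_pos]
    rw [pv_go_eq (o :: ot) new (by simp) _ _ _ (by rw [hdrop]; simp [List.length_append])]
    rw [hdrop]
    simp

-- ---- mismatch within the zipped region ----
def pvMisB (a b : List Char) : Bool := (a.zip b).any fun p => p.1 ≠ p.2

lemma pv_mis_not_prefix_left (a b t : List Char) (h : pvMisB a b = true) :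
    ¬ b.isPrefixOf (a ++ t) = true := by
  induction a generalizing b t with
  | nil => simp [pvMisB] at h
  | cons x a' ih =>
    cases b with
    | nil => simp [pvMisB] at h
    | cons y b' =>
      intro hpf
      simp only [pvMisB, List.zip_cons_cons, List.any_cons, Bool.or_eq_true,
        decide_eq_true_eq] at h
      simp only [List.cons_append, List.isPrefixOf, Bool.and_eq_true, beq_iff_eq] at hpf
      rcases h with h | h
      · exact h hpf.1.symm
      · exact ih b' t h hpf.2

lemma pv_mis_not_prefix_right (a b t : List Char) (h : pvMisB a b = true) :
    ¬ a.isPrefixOf (b ++ t) = true := by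
  induction a generalizing b t with
  | nil => simp [pvMisB] at h
  | cons x a' ih =>
    cases b with
    | nil => simp [pvMisB] at h
    | cons y b' =>
      intro hpf
      simp only [pvMisB, List.zip_cons_cons, List.any_cons, Bool.or_eq_true,
        decide_eq_true_eq] at h
      simp only [List.cons_append, List.isPrefixOf, Bool.and_eq_true, beq_iff_eq] at hpf
      rcases h with h | h
      · exact h hpf.1
      · exact ih b' t h hpf.2

-- ---- pvMatch facts ----
lemma pv_match_none_iff (ks : List (List Char × List Char)) (s : List Char) :
    pvMatch ks s = none ↔ ∀ p ∈ ks, ¬ p.1.isPrefixOf s = true := by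
  induction ks with
  | nil => simp [pvMatch]
  | cons p ks ih =>
    obtain ⟨k, v⟩ := p
    by_cases hp : k.isPrefixOf s = true
    · simp only [pvMatch, hp, if_pos]
      constructor
      · intro hc; cases hc
      · intro hall; exact absurd hp (hall (k, v) (by simp))
    · simp only [pvMatch, hp, if_neg, Bool.false_eq_true, not_false_eq_true]
      rw [ih]
      constructor
      · intro h p hm
        rcases List.mem_cons.mp hm with heq | hm'
        · subst heq; exact hp
        · exact h p hm'
      · intro h p hm; exact h p (List.mem_cons_of_mem _ hm)

lemma pv_match_some_mem (ks : List (List Char × List Char)) (s : List Char)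
    (k v : List Char) (h : pvMatch ks s = some (k, v)) :
    (k, v) ∈ ks ∧ k.isPrefixOf s = true := by
  induction ks with
  | nil => simp [pvMatch] at h
  | cons p ks ih =>
    obtain ⟨k', v'⟩ := p
    by_cases hp : k'.isPrefixOf s = true
    · simp only [pvMatch, hp, if_pos, Option.some.injEq, Prod.mk.injEq] at h
      exact ⟨by simp [h.1, h.2], h.1 ▸ hp⟩
    · simp only [pvMatch, hp, if_neg, Bool.false_eq_true, not_false_eq_true] at h
      exact ⟨List.mem_cons_of_mem _ (ih h).1, (ih h).2⟩

lemma pv_match_append_some (ks l : List (List Char × List Char)) (s : List Char)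
    (x : List Char × List Char) (h : pvMatch ks s = some x) :
    pvMatch (ks ++ l) s = some x := by
  induction ks with
  | nil => simp [pvMatch] at h
  | cons p ks ih =>
    obtain ⟨k', v'⟩ := p
    by_cases hp : k'.isPrefixOf s = true
    · rw [List.cons_append]
      simp only [pvMatch, hp, if_pos] at h ⊢
      exact h
    · simp only [List.cons_append, pvMatch, hp, if_neg, Bool.false_eq_true,
        not_false_eq_true] at h ⊢
      exact ih h

lemma pv_match_append_none (ks l : List (List Char × List Char)) (s : List Char)
    (h : pvMatch ks s = none) :
    pvMatch (ks ++ l) s = pvMatch l s := by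
  induction ks with
  | nil => simp
  | cons p ks ih =>
    obtain ⟨k', v'⟩ := p
    by_cases hp : k'.isPrefixOf s = true
    · simp [pvMatch, hp] at h
    · simp only [pvMatch, hp, if_neg, Bool.false_eq_true, not_false_eq_true] at h
      simp only [List.cons_append, pvMatch, hp, if_neg, Bool.false_eq_true, not_false_eq_true]
      exact ih h

-- ---- pass equations ----
lemma pv_passF_fuel (ks : List (List Char × List Char)) :
    ∀ fuel s, s.length ≤ fuel → pvPassF ks fuel s = pvPass ks s := by
  intro fuel
  induction fuel using Nat.strong_induction_on with
  | _ fuel ih =>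
    intro s hl
    match fuel, s with
    | 0, s =>
      have : s = [] := List.eq_nil_of_length_eq_zero (Nat.le_zero.mp hl)
      subst this; rfl
    | f + 1, [] => simp [pvPassF, pvPass]
    | f + 1, c :: cs =>
      have hf : cs.length ≤ f := by simp only [List.length_cons] at hl; omega
      cases hm : pvMatch ks (c :: cs) with
      | some p =>
        obtain ⟨k, v⟩ := p
        have hd : (cs.drop (k.length - 1)).length ≤ cs.length := by
          simp [List.length_drop]
        simp only [pvPass, List.length_cons, pvPassF, hm]
        rw [ih f (by omega) _ (hd.trans hf), ih cs.length (by omega) _ hd]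
      | none =>
        simp only [pvPass, List.length_cons, pvPassF, hm]
        rw [ih f (by omega) cs hf, ih cs.length (by omega) cs (le_refl _)]

lemma pv_pass_nil (ks : List (List Char × List Char)) : pvPass ks [] = [] := rfl

lemma pv_pass_cons_some (ks : List (List Char × List Char)) (c : Char) (cs k v : List Char)
    (h : pvMatch ks (c :: cs) = some (k, v)) :
    pvPass ks (c :: cs) = v ++ pvPass ks (cs.drop (k.length - 1)) := by
  simp only [pvPass, List.length_cons, pvPassF, h]
  rw [pv_passF_fuel ks cs.length _ (by simp [List.length_drop])]
  rfl

lemma pv_pass_cons_none (ks : List (List Char × List Char)) (c : Char) (cs : List Char)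
    (h : pvMatch ks (c :: cs) = none) :
    pvPass ks (c :: cs) = c :: pvPass ks cs := by
  simp only [pvPass, List.length_cons, pvPassF, h]

lemma pv_pass_no_keys : ∀ s, pvPass [] s = s := by
  intro s
  induction s with
  | nil => rfl
  | cons c cs ih => rw [pv_pass_cons_none [] c cs rfl, ih]

-- ---- skip lemmas ----
lemma pv_skip_replace (k v : List Char) :
    ∀ a t, (∀ m < a.length, pvMisB (a.drop m) k = true) →
      PySem.Chars.replace (a ++ t) k v = a ++ PySem.Chars.replace t k v := by
  intro a
  induction a with
  | nil => intro t _; simp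
  | cons c a' ih =>
    intro t hmis
    have h0 : pvMisB (c :: a') k = true := by simpa using hmis 0 (by simp)
    rw [List.cons_append,
        pv_replace_cons_neg k v c (a' ++ t)
          (by simpa using pv_mis_not_prefix_left (c :: a') k t h0),
        ih t (fun m hm => by simpa using hmis (m + 1) (by simpa using Nat.succ_lt_succ hm)),
        List.cons_append]

lemma pv_skip_pass (ks : List (List Char × List Char)) :
    ∀ a t, (∀ m < a.length, ∀ p ∈ ks, pvMisB (a.drop m) p.1 = true) →
      pvPass ks (a ++ t) = a ++ pvPass ks t := by
  intro a
  induction a with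
  | nil => intro t _; simp
  | cons c a' ih =>
    intro t hmis
    have hnone : pvMatch ks (c :: (a' ++ t)) = none := by
      rw [pv_match_none_iff]
      intro p hp
      simpa using pv_mis_not_prefix_left (c :: a') p.1 t (by simpa using hmis 0 (by simp) p hp)
    rw [List.cons_append, pv_pass_cons_none ks c (a' ++ t) hnone,
        ih t (fun m hm p hp => by
          simpa using hmis (m + 1) (by simpa using Nat.succ_lt_succ hm) p hp),
        List.cons_append]

-- ---- a prefix of the pass output that never meets a replacement is a prefix of the input ----
lemma pv_L3 (ks : List (List Char × List Char)) :
    ∀ n cs, cs.length ≤ n → ∀ u, u ≠ [] →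
      (∀ m < u.length, ∀ p ∈ ks, pvMisB (u.drop m) p.2 = true) →
      u.isPrefixOf (pvPass ks cs) = true → u.isPrefixOf cs = true := by
  intro n
  induction n with
  | zero =>
    intro cs hl u hu hgood hpfx
    have : cs = [] := List.eq_nil_of_length_eq_zero (Nat.le_zero.mp hl)
    subst this
    rcases u with _ | ⟨x, u'⟩
    · exact absurd rfl hu
    · simp [pvPass, pvPassF] at hpfx
  | succ n ih =>
    intro cs hl u hu hgood hpfx
    cases cs with
    | nil =>
      rcases u with _ | ⟨x, u'⟩
      · exact absurd rfl hu
      · simp [pvPass, pvPassF] at hpfx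
    | cons c cs' =>
      cases hm : pvMatch ks (c :: cs') with
      | some p =>
        obtain ⟨k, v⟩ := p
        rw [pv_pass_cons_some _ _ _ _ _ hm] at hpfx
        obtain ⟨hmem, -⟩ := pv_match_some_mem _ _ _ _ hm
        have hmis : pvMisB u v = true := by
          simpa using hgood 0 (List.length_pos_iff.mpr hu) (k, v) hmem
        exact absurd hpfx (pv_mis_not_prefix_right u v _ hmis)
      | none =>
        rw [pv_pass_cons_none _ _ _ hm] at hpfx
        rcases u with _ | ⟨x, u'⟩
        · exact absurd rfl hu
        · simp only [List.isPrefixOf, Bool.and_eq_true, beq_iff_eq] at hpfx ⊢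
          refine ⟨hpfx.1, ?_⟩
          by_cases hu' : u' = []
          · subst hu'; simp [List.isPrefixOf]
          · exact ih cs' (by simp only [List.length_cons] at hl; omega) u' hu'
              (fun m hm p hp => by
                simpa using hgood (m + 1) (by simpa using Nat.succ_lt_succ hm) p hp)
              hpfx.2

-- the first eight keys, without Void
def pvKs8 : List (List Char × List Char) :=
  [("Int32".toList, "int".toList), ("Int64".toList, "long".toList), ("Int16".toList, "short".toList),
   ("Single".toList, "float".toList), ("Double".toList, "double".toList), ("Boolean".toList, "bool".toList),
   ("Byte".toList, "byte".toList), ("String".toList, "string".toList)]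

-- the single exception to pv_L3: "oid" before the output of Double→double (the "VoiDouble" cascade)
lemma pv_L3' :
    ∀ n cs, cs.length ≤ n →
      ( ("oid".toList.isPrefixOf (pvPass pvKs8 cs) = true →
          "oid".toList.isPrefixOf cs = true ∨ "oiDouble".toList.isPrefixOf cs = true)
      ∧ ("id".toList.isPrefixOf (pvPass pvKs8 cs) = true →
          "id".toList.isPrefixOf cs = true ∨ "iDouble".toList.isPrefixOf cs = true)
      ∧ ("d".toList.isPrefixOf (pvPass pvKs8 cs) = true →
          "d".toList.isPrefixOf cs = true ∨ "Double".toList.isPrefixOf cs = true) ) := by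
  intro n
  induction n with
  | zero =>
    intro cs hl
    have : cs = [] := List.eq_nil_of_length_eq_zero (Nat.le_zero.mp hl)
    subst this
    refine ⟨fun hpfx => ?_, fun hpfx => ?_, fun hpfx => ?_⟩ <;> simp [pvPass, pvPassF] at hpfx
  | succ n ih =>
    intro cs hl
    cases cs with
    | nil =>
      refine ⟨fun hpfx => ?_, fun hpfx => ?_, fun hpfx => ?_⟩ <;> simp [pvPass, pvPassF] at hpfx
    | cons c cs' =>
      have hl' : cs'.length ≤ n := by simp only [List.length_cons] at hl; omega
      cases hm : pvMatch pvKs8 (c :: cs') with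
      | some p =>
        obtain ⟨k, v⟩ := p
        obtain ⟨hmem, hkpfx⟩ := pv_match_some_mem _ _ _ _ hm
        simp only [pvKs8, List.mem_cons, List.not_mem_nil, or_false, Prod.mk.injEq] at hmem
        refine ⟨fun hpfx => ?_, fun hpfx => ?_, fun hpfx => ?_⟩ <;>
          rw [pv_pass_cons_some _ _ _ _ _ hm] at hpfx
        · rcases hmem with ⟨rfl, rfl⟩ | ⟨rfl, rfl⟩ | ⟨rfl, rfl⟩ | ⟨rfl, rfl⟩ | ⟨rfl, rfl⟩ |
            ⟨rfl, rfl⟩ | ⟨rfl, rfl⟩ | ⟨rfl, rfl⟩ <;>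
            exact absurd hpfx (pv_mis_not_prefix_right _ _ _ (by decide))
        · rcases hmem with ⟨rfl, rfl⟩ | ⟨rfl, rfl⟩ | ⟨rfl, rfl⟩ | ⟨rfl, rfl⟩ | ⟨rfl, rfl⟩ |
            ⟨rfl, rfl⟩ | ⟨rfl, rfl⟩ | ⟨rfl, rfl⟩ <;>
            exact absurd hpfx (pv_mis_not_prefix_right _ _ _ (by decide))
        · rcases hmem with ⟨rfl, rfl⟩ | ⟨rfl, rfl⟩ | ⟨rfl, rfl⟩ | ⟨rfl, rfl⟩ | ⟨rfl, rfl⟩ |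
            ⟨rfl, rfl⟩ | ⟨rfl, rfl⟩ | ⟨rfl, rfl⟩
          · exact absurd hpfx (pv_mis_not_prefix_right _ _ _ (by decide))
          · exact absurd hpfx (pv_mis_not_prefix_right _ _ _ (by decide))
          · exact absurd hpfx (pv_mis_not_prefix_right _ _ _ (by decide))
          · exact absurd hpfx (pv_mis_not_prefix_right _ _ _ (by decide))
          · exact Or.inr hkpfx
          · exact absurd hpfx (pv_mis_not_prefix_right _ _ _ (by decide))
          · exact absurd hpfx (pv_mis_not_prefix_right _ _ _ (by decide))
          · exact absurd hpfx (pv_mis_not_prefix_right _ _ _ (by decide))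
      | none =>
        refine ⟨fun hpfx => ?_, fun hpfx => ?_, fun hpfx => ?_⟩ <;>
          rw [pv_pass_cons_none _ _ _ hm] at hpfx <;>
          simp only [show ("oid".toList : List Char) = 'o' :: "id".toList from rfl,
            show ("id".toList : List Char) = 'i' :: "d".toList from rfl,
            show ("d".toList : List Char) = 'd' :: ([] : List Char) from rfl,
            List.isPrefixOf, Bool.and_eq_true, beq_iff_eq] at hpfx ⊢
        · rcases (ih cs' hl').2.1 (by simpa [List.isPrefixOf] using hpfx.2) with h | h
          · refine Or.inl ⟨hpfx.1, ?_⟩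
            simpa [show ("id".toList : List Char) = 'i' :: 'd' :: [] from rfl,
              List.isPrefixOf] using h
          · refine Or.inr ?_
            simp only [show ("oiDouble".toList : List Char) = 'o' :: "iDouble".toList from rfl,
              List.isPrefixOf, Bool.and_eq_true, beq_iff_eq]
            exact ⟨hpfx.1, h⟩
        · rcases (ih cs' hl').2.2 (by simpa [List.isPrefixOf] using hpfx.2) with h | h
          · refine Or.inl ⟨hpfx.1, ?_⟩
            simpa [show ("d".toList : List Char) = 'd' :: [] from rfl,
              List.isPrefixOf] using h
          · refine Or.inr ?_
            simp only [show ("iDouble".toList : List Char) = 'i' :: "Double".toList from rfl,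
              List.isPrefixOf, Bool.and_eq_true, beq_iff_eq]
            exact ⟨hpfx.1, h⟩
        · exact Or.inl ⟨hpfx.1, by simp⟩

-- ---- the inductive step: one more .replace equals the pass with one more key ----
lemma pv_step (ks : List (List Char × List Char)) (k v : List Char) (C : List Char → Prop)
    (hk : k ≠ [])
    (hks : ∀ p ∈ ks, p.1 ≠ [])
    (hC1 : ∀ p ∈ ks, ∀ m < p.2.length, pvMisB (p.2.drop m) k = true)
    (hC3 : ∀ m < k.length - 1, ∀ p ∈ ks, pvMisB ((k.drop 1).drop m) p.1 = true)
    (hCdrop : ∀ s n, C s → C (s.drop n))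
    (hHead : ∀ c cs, C (c :: cs) → pvMatch ks (c :: cs) = none →
        ¬ k.isPrefixOf (c :: cs) = true → ¬ k.isPrefixOf (c :: pvPass ks cs) = true) :
    ∀ n s, s.length ≤ n → C s →
      PySem.Chars.replace (pvPass ks s) k v = pvPass (ks ++ [(k, v)]) s := by
  intro n
  induction n with
  | zero =>
    intro s hl _
    have : s = [] := List.eq_nil_of_length_eq_zero (Nat.le_zero.mp hl)
    subst this
    rw [pv_pass_nil, pv_pass_nil, pv_replace_nil k v hk]
  | succ n ih =>
    intro s hl hC
    cases s with
    | nil => rw [pv_pass_nil, pv_pass_nil, pv_replace_nil k v hk]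
    | cons c cs =>
      have hlc : cs.length ≤ n := by simp only [List.length_cons] at hl; omega
      cases hm : pvMatch ks (c :: cs) with
      | some p =>
        obtain ⟨k', v'⟩ := p
        obtain ⟨hmem, hkpfx⟩ := pv_match_some_mem _ _ _ _ hm
        have hk' : k' ≠ [] := hks _ hmem
        have hd : (cs.drop (k'.length - 1)).length ≤ n := by
          simp only [List.length_drop]; omega
        have hCd : C (cs.drop (k'.length - 1)) := by
          rcases k' with _ | ⟨k0, kt⟩
          · exact absurd rfl hk'
          · simpa using hCdrop (c :: cs) (kt.length + 1) hC
        rw [pv_pass_cons_some _ _ _ _ _ hm,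
            pv_skip_replace k v v' _ (fun m hm' => hC1 (k', v') hmem m hm'),
            ih _ hd hCd,
            pv_pass_cons_some _ _ _ _ _ (pv_match_append_some ks [(k, v)] _ _ hm)]
      | none =>
        rw [pv_pass_cons_none _ _ _ hm]
        by_cases hkp : k.isPrefixOf (c :: cs) = true
        · rcases k with _ | ⟨k0, kt⟩
          · exact absurd rfl hk
          · have hc : k0 = c ∧ kt.isPrefixOf cs = true := by
              simpa [List.isPrefixOf] using hkp
            obtain ⟨rfl, hktp⟩ := hc
            obtain ⟨t, ht⟩ : ∃ t, kt ++ t = cs := List.isPrefixOf_iff_prefix.mp hktp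
            have hkt : pvPass ks cs = kt ++ pvPass ks t := by
              rw [← ht, pv_skip_pass ks kt t (fun m hm' p hp =>
                hC3 m (by simpa using hm') p hp)]
            have hCt : C t := by
              have := hCdrop (k0 :: cs) (kt.length + 1) hC
              rw [show List.drop (kt.length + 1) (k0 :: cs) = List.drop kt.length cs from rfl,
                ← ht, List.drop_left] at this
              exact this
            have hmatch : pvMatch (ks ++ [(k0 :: kt, v)]) (k0 :: cs) = some (k0 :: kt, v) := by
              rw [pv_match_append_none _ _ _ hm]
              simp [pvMatch, hkp]
            have hdrop : List.drop ((k0 :: kt).length - 1) cs = t := by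
              simp only [List.length_cons, Nat.add_sub_cancel]
              rw [← ht, List.drop_left]
            rw [hkt, ← List.cons_append,
                pv_replace_pos (k0 :: kt) v (pvPass ks t) hk,
                ih t (by simp only [← ht, List.length_append] at hlc; omega) hCt,
                pv_pass_cons_some _ _ _ _ _ hmatch, hdrop]
        · have hnk : ¬ k.isPrefixOf (c :: pvPass ks cs) = true := hHead c cs hC hm hkp
          have hnone : pvMatch (ks ++ [(k, v)]) (c :: cs) = none := by
            rw [pv_match_append_none _ _ _ hm]
            simp [pvMatch, hkp]
          rw [pv_replace_cons_neg k v _ _ hnk,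
              ih cs hlc (by simpa using hCdrop (c :: cs) 1 hC),
              pv_pass_cons_none _ _ _ hnone]

-- pv_step for each of the first eight keys: no suffix of the key tail meets an earlier value
lemma pv_step_of_good (ks : List (List Char × List Char)) (k v : List Char)
    (hk : k ≠ [])
    (hks : ∀ p ∈ ks, p.1 ≠ [])
    (hC1 : ∀ p ∈ ks, ∀ m < p.2.length, pvMisB (p.2.drop m) k = true)
    (hC3 : ∀ m < k.length - 1, ∀ p ∈ ks, pvMisB ((k.drop 1).drop m) p.1 = true)
    (hgood : ∀ m < k.length - 1, ∀ p ∈ ks, pvMisB ((k.drop 1).drop m) p.2 = true) :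
    ∀ s, PySem.Chars.replace (pvPass ks s) k v = pvPass (ks ++ [(k, v)]) s := by
  intro s
  refine pv_step ks k v (fun _ => True) hk hks hC1 hC3 (fun _ _ _ => trivial) ?_
    s.length s (le_refl _) trivial
  intro c cs _ hnone hnpfx hpfx
  rcases k with _ | ⟨k0, kt⟩
  · exact absurd rfl hk
  · have hc : k0 = c ∧ kt.isPrefixOf (pvPass ks cs) = true := by
      simpa [List.isPrefixOf] using hpfx
    by_cases hkt : kt = []
    · subst hkt
      exact hnpfx (by simp [List.isPrefixOf, hc.1])
    · have := pv_L3 ks cs.length cs (le_refl _) kt hkt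
        (fun m hm p hp => hgood m (by simpa using hm) p hp) hc.2
      exact hnpfx (by simp [List.isPrefixOf, hc.1, this])

-- pv_step for Void, away from the cascade region
lemma pv_step9 : ∀ s, ¬ ("VoiDouble".toList <:+: s) →
    PySem.Chars.replace (pvPass pvKs8 s) "Void".toList "void".toList
      = pvPass (pvKs8 ++ [("Void".toList, "void".toList)]) s := by
  intro s hs
  refine pv_step pvKs8 "Void".toList "void".toList
    (fun s => ¬ ("VoiDouble".toList <:+: s))
    (by decide) (by decide) (by decide) (by decide)
    (fun s n hC hinf => hC (hinf.trans (List.drop_suffix n s).isInfix))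
    ?_ s.length s (le_refl _) hs
  intro c cs hC hnone hnpfx hpfx
  have hc : 'V' = c ∧ "oid".toList.isPrefixOf (pvPass pvKs8 cs) = true := by
    simpa [show ("Void".toList : List Char) = 'V' :: "oid".toList from rfl, List.isPrefixOf]
      using hpfx
  rcases (pv_L3' cs.length cs (le_refl _)).1 hc.2 with h | h
  · refine hnpfx ?_
    simp only [show ("Void".toList : List Char) = 'V' :: "oid".toList from rfl,
      List.isPrefixOf, Bool.and_eq_true, beq_iff_eq]
    exact ⟨hc.1, h⟩
  · exact hC (List.IsPrefix.isInfix (by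
      rw [show ("VoiDouble".toList : List Char) = 'V' :: "oiDouble".toList from rfl]
      exact List.cons_prefix_cons.mpr ⟨hc.1, List.isPrefixOf_iff_prefix.mp h⟩))

-- the first eight sequential replaces equal the eight-key pass (no side condition)
lemma pv_chain8 : ∀ s : List Char,
    PySem.Chars.replace (PySem.Chars.replace (PySem.Chars.replace (PySem.Chars.replace
      (PySem.Chars.replace (PySem.Chars.replace (PySem.Chars.replace (PySem.Chars.replace s
        "Int32".toList "int".toList)
        "Int64".toList "long".toList) "Int16".toList "short".toList)
        "Single".toList "float".toList) "Double".toList "double".toList)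
        "Boolean".toList "bool".toList) "Byte".toList "byte".toList)
        "String".toList "string".toList
      = pvPass pvKs8 s := by
  intro s
  have e1 := pv_step_of_good [] "Int32".toList "int".toList
    (by decide) (by decide) (by decide) (by decide) (by decide) s
  rw [pv_pass_no_keys s] at e1
  rw [e1]; simp only [List.nil_append]
  rw [pv_step_of_good [("Int32".toList, "int".toList)] "Int64".toList "long".toList
    (by decide) (by decide) (by decide) (by decide) (by decide) s]
  simp only [List.cons_append, List.nil_append]
  rw [pv_step_of_good [("Int32".toList, "int".toList), ("Int64".toList, "long".toList)]
    "Int16".toList "short".toList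
    (by decide) (by decide) (by decide) (by decide) (by decide) s]
  simp only [List.cons_append, List.nil_append]
  rw [pv_step_of_good [("Int32".toList, "int".toList), ("Int64".toList, "long".toList),
    ("Int16".toList, "short".toList)] "Single".toList "float".toList
    (by decide) (by decide) (by decide) (by decide) (by decide) s]
  simp only [List.cons_append, List.nil_append]
  rw [pv_step_of_good [("Int32".toList, "int".toList), ("Int64".toList, "long".toList),
    ("Int16".toList, "short".toList), ("Single".toList, "float".toList)]
    "Double".toList "double".toList
    (by decide) (by decide) (by decide) (by decide) (by decide) s]
  simp only [List.cons_append, List.nil_append]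
  rw [pv_step_of_good [("Int32".toList, "int".toList), ("Int64".toList, "long".toList),
    ("Int16".toList, "short".toList), ("Single".toList, "float".toList),
    ("Double".toList, "double".toList)] "Boolean".toList "bool".toList
    (by decide) (by decide) (by decide) (by decide) (by decide) s]
  simp only [List.cons_append, List.nil_append]
  rw [pv_step_of_good [("Int32".toList, "int".toList), ("Int64".toList, "long".toList),
    ("Int16".toList, "short".toList), ("Single".toList, "float".toList),
    ("Double".toList, "double".toList), ("Boolean".toList, "bool".toList)]
    "Byte".toList "byte".toList
    (by decide) (by decide) (by decide) (by decide) (by decide) s]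
  simp only [List.cons_append, List.nil_append]
  rw [pv_step_of_good [("Int32".toList, "int".toList), ("Int64".toList, "long".toList),
    ("Int16".toList, "short".toList), ("Single".toList, "float".toList),
    ("Double".toList, "double".toList), ("Boolean".toList, "bool".toList),
    ("Byte".toList, "byte".toList)] "String".toList "string".toList
    (by decide) (by decide) (by decide) (by decide) (by decide) s]
  simp only [List.cons_append, List.nil_append]
  rfl

-- the nine sequential replaces equal the nine-key pass, away from the cascade region
lemma pv_chain : ∀ s : List Char, ¬ ("VoiDouble".toList <:+: s) →
    PySem.Chars.replace (PySem.Chars.replace (PySem.Chars.replace (PySem.Chars.replace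
      (PySem.Chars.replace (PySem.Chars.replace (PySem.Chars.replace (PySem.Chars.replace
        (PySem.Chars.replace s "Int32".toList "int".toList)
        "Int64".toList "long".toList) "Int16".toList "short".toList)
        "Single".toList "float".toList) "Double".toList "double".toList)
        "Boolean".toList "bool".toList) "Byte".toList "byte".toList)
        "String".toList "string".toList) "Void".toList "void".toList
      = pvPass pvKeys s := by
  intro s hs
  rw [pv_chain8 s, pv_step9 s hs]
  rfl

-- ===== VERDICT (by name: the statement is the Claim_ definition above) =====
theorem csharp_safe_type_spec : Claim_equal_csharp_safe_type := by
  intro s _ hpre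
  apply String.toList_inj.mp
  have hB : (csharp_safe_type_alt s).toList = pvPass pvKeys s.toList := by
    simp only [csharp_safe_type_alt, String.toList_ofList]; rfl
  have hA := pv_chain s.toList hpre
  rw [hB, ← hA]
  simp only [csharp_safe_type, PySem.Str.toList_replace]
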